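-- pv_equiv track=rewrite | github.com/todorpeychinov/Programing_fundamentals_with_python | Text_processing_ex/winning_ticket.py | check_ticket
-- ===== SOURCE A (Python) =====
-- def check_ticket(ticket):
--     wining_symbols = ['@', '#', '$', '^']
--
--     if len(ticket) != 20:
--         return 'invalid ticket'
--
--     left_side = ticket[:10]
--     right_side = ticket[10:]
--
--
--     for symbol in wining_symbols:
--         for number_of_symbols in range(10, 5, -1):
--             uninterrupted_symbols = symbol * number_of_symbols
--             if uninterrupted_symbols in left_side and uninterrupted_symbols in right_side:
--                 if number_of_symbols == 10:
--                     return f'ticket "{ticket}" - {number_of_symbols}{symbol} Jackpot!'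
--                 return f'ticket "{ticket}" - {number_of_symbols}{symbol}'
--     return f'ticket "{ticket}" - no match'
-- ===== SOURCE B (Python) =====
-- def check_ticket(ticket):
--     if len(ticket) != 20:
--         return 'invalid ticket'
--
--     left_side = ticket[:10]
--     right_side = ticket[10:]
--
--     def max_run(ch, half):
--         best = 0
--         cur = 0
--         for c in half:
--             cur = cur + 1 if c == ch else 0
--             if cur > best:
--                 best = cur
--         return best
--
--     for symbol in '@#$^':
--         m = min(max_run(symbol, left_side), max_run(symbol, right_side))
--         if m >= 6:
--             suffix = ' Jackpot!' if m == 10 else ''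
--             return f'ticket "{ticket}" - {m}{symbol}{suffix}'
--     return f'ticket "{ticket}" - no match'
-- ===== Notes on version B (the rewrite author's own statement) =====
-- stated objective: alternative
-- what changed: Instead of generating a repeated-symbol substring for each candidate length 10 down to 6 and searching both ticket halves for it, B makes one run-length scan per symbol and half (tracking current and best consecutive run) and reports min(run_left, run_right) when it is at least 6.
import Mathlib
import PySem

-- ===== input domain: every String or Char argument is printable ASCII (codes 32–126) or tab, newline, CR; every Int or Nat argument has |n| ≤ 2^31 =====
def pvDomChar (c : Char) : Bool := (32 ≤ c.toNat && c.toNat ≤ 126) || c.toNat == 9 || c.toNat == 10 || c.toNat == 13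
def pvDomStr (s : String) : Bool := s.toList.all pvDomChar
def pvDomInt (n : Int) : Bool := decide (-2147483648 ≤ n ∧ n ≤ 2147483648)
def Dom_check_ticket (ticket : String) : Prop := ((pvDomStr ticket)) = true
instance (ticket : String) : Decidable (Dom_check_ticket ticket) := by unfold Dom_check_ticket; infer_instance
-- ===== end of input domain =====

-- B replaces A's generate-and-search over repeated-symbol substrings by one run-length
-- scan per symbol and half (objective: alternative algorithm, same observable results).

-- ===== PORT A =====
-- inner 'for number_of_symbols in range(10, 5, -1)' loop of A, with its returns (some = return)
def pvInnerA (ticket left_side right_side symbol : String) : List Int → Option String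
  | [] => none
  | n :: rest =>
    let uninterrupted_symbols := String.ofList (PySem.List.pyRepeat symbol.toList n)
    if PySem.Str.isIn uninterrupted_symbols left_side &&
       PySem.Str.isIn uninterrupted_symbols right_side then
      if n == 10 then
        some ("ticket \"" ++ ticket ++ "\" - " ++ PySem.Int.toStr n ++ symbol ++ " Jackpot!")
      else
        some ("ticket \"" ++ ticket ++ "\" - " ++ PySem.Int.toStr n ++ symbol)
    else pvInnerA ticket left_side right_side symbol rest

-- outer 'for symbol in wining_symbols' loop of A
def pvOuterA (ticket left_side right_side : String) : List String → Option String
  | [] => none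
  | symbol :: rest =>
    match pvInnerA ticket left_side right_side symbol (PySem.List.pyRange 10 5 (-1)) with
    | some r => some r
    | none => pvOuterA ticket left_side right_side rest

def check_ticket (ticket : String) : String :=
  let wining_symbols := ["@", "#", "$", "^"]
  if PySem.Str.len ticket ≠ 20 then "invalid ticket"
  else
    let left_side := PySem.Str.slice ticket none (some 10)
    let right_side := PySem.Str.slice ticket (some 10) none
    match pvOuterA ticket left_side right_side wining_symbols with
    | some r => r
    | none => "ticket \"" ++ ticket ++ "\" - no match"

-- ===== PORT B =====
-- body of max_run's 'for c in half' loop: state (best, cur)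
def pvRunStep (ch : Char) (st : Nat × Nat) (c : Char) : Nat × Nat :=
  let cur := if c == ch then st.2 + 1 else 0
  (if cur > st.1 then cur else st.1, cur)

-- max_run(ch, half)
def pvMaxRun (ch : Char) (half : List Char) : Nat :=
  (half.foldl (pvRunStep ch) (0, 0)).1

-- B's 'for symbol in '@#$^'' loop, with its returns
def pvSymLoopB (ticket : String) (left_side right_side : List Char) : List Char → String
  | [] => "ticket \"" ++ ticket ++ "\" - no match"
  | symbol :: rest =>
    let m := min (pvMaxRun symbol left_side) (pvMaxRun symbol right_side)
    if 6 ≤ m then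
      let suffix := if m == 10 then " Jackpot!" else ""
      "ticket \"" ++ ticket ++ "\" - " ++ PySem.Int.toStr (m : Int) ++ String.ofList [symbol] ++ suffix
    else pvSymLoopB ticket left_side right_side rest

def check_ticket_alt (ticket : String) : String :=
  if PySem.Str.len ticket ≠ 20 then "invalid ticket"
  else
    let left_side := PySem.Str.slice ticket none (some 10)
    let right_side := PySem.Str.slice ticket (some 10) none
    pvSymLoopB ticket left_side.toList right_side.toList ['@', '#', '$', '^']

-- ===== PRECONDITION & SPEC =====
def Spec_check_ticket (ticket : String) (out : String) : Prop := out = check_ticket_alt ticket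
instance (ticket : String) (out : String) : Decidable (Spec_check_ticket ticket out) := by unfold Spec_check_ticket; infer_instance

-- ===== CLAIM (what is proved, stated in full; the proofs are below) =====
def Claim_equal_check_ticket : Prop := ∀ (ticket : String), Dom_check_ticket ticket → Spec_check_ticket ticket (check_ticket ticket)

-- ===== LEMMAS AND PROOFS =====

-- 'replicate (k+1) ch' is a suffix of 's ++ [a]' iff a is ch and 'replicate k ch' is a suffix of s
theorem pvReplSuffixConcat (ch a : Char) (s : List Char) (k : Nat) :
    List.replicate (k+1) ch <:+ s ++ [a] ↔ ch = a ∧ List.replicate k ch <:+ s := by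
  constructor
  · intro h
    have h' : (List.replicate (k+1) ch).reverse <+: (s ++ [a]).reverse :=
      List.reverse_prefix.mpr h
    rw [List.reverse_replicate, List.replicate_succ, List.reverse_append,
        List.reverse_singleton, List.singleton_append, List.cons_prefix_cons] at h'
    obtain ⟨h1, h2⟩ := h'
    rw [← List.reverse_replicate] at h2
    exact ⟨h1, List.reverse_prefix.mp h2⟩
  · rintro ⟨rfl, t, ht⟩
    refine ⟨t, ?_⟩
    rw [List.replicate_succ', ← List.append_assoc, ht]

-- the fold of pvRunStep computes: .2 = length of the trailing run of ch (as a
-- replicate-suffix characterisation), .1 = the longest run (replicate-infix characterisation)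
theorem pvRun_invariant (ch : Char) (s : List Char) :
    (∀ n : Nat, List.replicate n ch <:+ s ↔ n ≤ (s.foldl (pvRunStep ch) (0, 0)).2) ∧
    (∀ n : Nat, List.replicate n ch <:+: s ↔ n ≤ (s.foldl (pvRunStep ch) (0, 0)).1) := by
  induction s using List.reverseRecOn with
  | nil => constructor <;> intro n <;> cases n <;> simp
  | append_singleton s a ih =>
    rcases hbk : s.foldl (pvRunStep ch) (0, 0) with ⟨b, k⟩
    rw [hbk] at ih
    obtain ⟨hsuf, hinf⟩ := ih
    by_cases hac : a = ch
    · have hcur : (a == ch) = true := by simp [hac]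
      have hfold : (s ++ [a]).foldl (pvRunStep ch) (0, 0) = (max b (k+1), k+1) := by
        simp [List.foldl_append, hbk, pvRunStep, hcur]
        split <;> omega
      have hsufnew : ∀ n : Nat, List.replicate n ch <:+ s ++ [a] ↔ n ≤ k + 1 := by
        intro n
        cases n with
        | zero => simp
        | succ m =>
          rw [pvReplSuffixConcat, hsuf m]
          simp only [hac, true_and]
          omega
      refine ⟨fun n => by rw [hfold]; exact hsufnew n, fun n => ?_⟩
      rw [List.infix_concat_iff, hsufnew n, hinf n, hfold]
      simp only
      omega
    · have hcur : (a == ch) = false := by simp [hac]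
      have hfold : (s ++ [a]).foldl (pvRunStep ch) (0, 0) = (max b 0, 0) := by
        simp [List.foldl_append, hbk, pvRunStep, hcur]
      have hsufnew : ∀ n : Nat, List.replicate n ch <:+ s ++ [a] ↔ n ≤ 0 := by
        intro n
        cases n with
        | zero => simp
        | succ m =>
          rw [pvReplSuffixConcat]
          exact iff_of_false (fun h => hac h.1.symm) (by omega)
      refine ⟨fun n => by rw [hfold]; exact hsufnew n, fun n => ?_⟩
      rw [List.infix_concat_iff, hsufnew n, hinf n, hfold]
      simp only
      omega

theorem pvMaxRun_iff (ch : Char) (s : List Char) (n : Nat) :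
    List.replicate n ch <:+: s ↔ n ≤ pvMaxRun ch s :=
  (pvRun_invariant ch s).2 n

theorem pvMaxRun_le (ch : Char) (s : List Char) : pvMaxRun ch s ≤ s.length := by
  have h := (pvMaxRun_iff ch s (pvMaxRun ch s)).mpr le_rfl
  simpa using h.length_le

-- A's substring test against 'symbol * n' is exactly a bound on B's longest run
theorem pvIsIn_repeat (ch : Char) (s : String) (n : Int) :
    PySem.Str.isIn (String.ofList (PySem.List.pyRepeat [ch] n)) s
      = decide (n.toNat ≤ pvMaxRun ch s.toList) := by
  rw [PySem.List.pyRepeat_singleton]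
  apply Bool.eq_iff_iff.mpr
  rw [decide_eq_true_eq, PySem.Str.isIn_iff_infix, String.toList_ofList]
  exact pvMaxRun_iff ch s.toList n.toNat

-- A's countdown search for one symbol returns exactly B's min-of-longest-runs answer
theorem pvInnerA_eq (ticket L R sym : String) (ch : Char) (hsym : sym.toList = [ch])
    (hL : pvMaxRun ch L.toList ≤ 10) (hR : pvMaxRun ch R.toList ≤ 10) :
    pvInnerA ticket L R sym (PySem.List.pyRange 10 5 (-1)) =
      (if 6 ≤ min (pvMaxRun ch L.toList) (pvMaxRun ch R.toList) then
        some ("ticket \"" ++ ticket ++ "\" - "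
          ++ PySem.Int.toStr ((min (pvMaxRun ch L.toList) (pvMaxRun ch R.toList) : Nat) : Int)
          ++ String.ofList [ch]
          ++ (if min (pvMaxRun ch L.toList) (pvMaxRun ch R.toList) == 10 then " Jackpot!" else ""))
      else none) := by
  have hsym' : sym = String.ofList [ch] := by rw [← hsym, String.ofList_toList]
  subst hsym'
  have hrange : PySem.List.pyRange 10 5 (-1) = [10, 9, 8, 7, 6] := by decide
  rw [hrange]
  have hInL : ∀ n : Int,
      PySem.Str.isIn (String.ofList (PySem.List.pyRepeat (String.ofList [ch]).toList n)) L
        = decide (n.toNat ≤ pvMaxRun ch L.toList) := fun n => by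
    rw [String.toList_ofList]; exact pvIsIn_repeat ch L n
  have hInR : ∀ n : Int,
      PySem.Str.isIn (String.ofList (PySem.List.pyRepeat (String.ofList [ch]).toList n)) R
        = decide (n.toNat ≤ pvMaxRun ch R.toList) := fun n => by
    rw [String.toList_ofList]; exact pvIsIn_repeat ch R n
  set mL := pvMaxRun ch L.toList with hmL
  set mR := pvMaxRun ch R.toList with hmR
  simp only [pvInnerA, hInL, hInR, Bool.and_eq_true, decide_eq_true_eq]
  by_cases h10 : (10:Int).toNat ≤ mL ∧ (10:Int).toNat ≤ mR
  · rw [if_pos h10]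
    have hm : min mL mR = 10 := by omega
    rw [hm]
    norm_num
  · rw [if_neg h10]
    by_cases h9 : (9:Int).toNat ≤ mL ∧ (9:Int).toNat ≤ mR
    · rw [if_pos h9]
      have hm : min mL mR = 9 := by omega
      rw [hm]
      norm_num [String.append_empty]
    · rw [if_neg h9]
      by_cases h8 : (8:Int).toNat ≤ mL ∧ (8:Int).toNat ≤ mR
      · rw [if_pos h8]
        have hm : min mL mR = 8 := by omega
        rw [hm]
        norm_num [String.append_empty]
      · rw [if_neg h8]
        by_cases h7 : (7:Int).toNat ≤ mL ∧ (7:Int).toNat ≤ mR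
        · rw [if_pos h7]
          have hm : min mL mR = 7 := by omega
          rw [hm]
          norm_num [String.append_empty]
        · rw [if_neg h7]
          by_cases h6 : (6:Int).toNat ≤ mL ∧ (6:Int).toNat ≤ mR
          · rw [if_pos h6]
            have hm : min mL mR = 6 := by omega
            rw [hm]
            norm_num [String.append_empty]
          · rw [if_neg h6]
            rw [if_neg (by omega : ¬ 6 ≤ min mL mR)]

theorem pvMain (ticket : String) : check_ticket ticket = check_ticket_alt ticket := by
  unfold check_ticket check_ticket_alt
  by_cases hlen : PySem.Str.len ticket ≠ 20
  · rw [if_pos hlen, if_pos hlen]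
  · rw [if_neg hlen, if_neg hlen]
    have hlen20 : ticket.toList.length = 20 := by
      have h := PySem.Str.len_eq ticket
      rw [not_not] at hlen
      omega
    have hLlist : (PySem.Str.slice ticket none (some 10)).toList = ticket.toList.take 10 := by
      simp [pysem]
    have hRlist : (PySem.Str.slice ticket (some 10) none).toList = ticket.toList.drop 10 := by
      simp [pysem]
    have hLle : ∀ ch : Char, pvMaxRun ch (PySem.Str.slice ticket none (some 10)).toList ≤ 10 := by
      intro ch
      refine le_trans (pvMaxRun_le ch _) ?_
      rw [hLlist]
      simp [hlen20]
    have hRle : ∀ ch : Char, pvMaxRun ch (PySem.Str.slice ticket (some 10) none).toList ≤ 10 := by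
      intro ch
      refine le_trans (pvMaxRun_le ch _) ?_
      rw [hRlist]
      simp [hlen20]
    simp only [pvOuterA, pvSymLoopB]
    rw [pvInnerA_eq ticket _ _ "@" '@' rfl (hLle '@') (hRle '@'),
        pvInnerA_eq ticket _ _ "#" '#' rfl (hLle '#') (hRle '#'),
        pvInnerA_eq ticket _ _ "$" '$' rfl (hLle '$') (hRle '$'),
        pvInnerA_eq ticket _ _ "^" '^' rfl (hLle '^') (hRle '^')]
    split_ifs <;> rfl

-- ===== VERDICT (by name: the statement is the Claim_ definition above) =====
theorem check_ticket_spec : Claim_equal_check_ticket := by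
  intro ticket _
  unfold Spec_check_ticket
  exact pvMain ticket
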